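-- pv_equiv track=rewrite | github.com/emilharru/arl | main.py | normalize_llm_role_execution
-- ===== SOURCE A (Python) =====
-- LLM_ROLE_NAMES = ("director",)
--
-- DEFAULT_LLM_ROLE_EXECUTION = {role: "remote" for role in LLM_ROLE_NAMES}
--
-- def normalize_llm_backend(value):
--     text = str(value or "").strip().lower()
--     return "local" if text == "local" else "remote"
--
-- def normalize_llm_role_execution(value):
--     normalized = dict(DEFAULT_LLM_ROLE_EXECUTION)
--     if not isinstance(value, dict):
--         return normalized
--
--     lowered = {str(k).strip().lower(): v for k, v in value.items()}
--     for role in LLM_ROLE_NAMES: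
--         if role in lowered:
--             normalized[role] = normalize_llm_backend(lowered.get(role))
--     return normalized
-- ===== SOURCE B (Python) =====
-- LLM_ROLE_NAMES = ("director",)
--
-- DEFAULT_LLM_ROLE_EXECUTION = {role: "remote" for role in LLM_ROLE_NAMES}
--
-- def normalize_llm_backend(value):
--     text = str(value or "").strip().lower()
--     return "local" if text == "local" else "remote"
--
-- def normalize_llm_role_execution(value):
--     if not isinstance(value, dict):
--         return dict(DEFAULT_LLM_ROLE_EXECUTION)
--     items = list(value.items())
--     result = {}
--     for role in LLM_ROLE_NAMES:
--         backend = DEFAULT_LLM_ROLE_EXECUTION[role]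
--         # search back-to-front: the first match from the end is the winner
--         for k, v in reversed(items):
--             if str(k).strip().lower() == role:
--                 backend = normalize_llm_backend(v)
--                 break
--         result[role] = backend
--     return result
-- ===== Notes on version B (the rewrite author's own statement) =====
-- stated objective: alternative
-- what changed: B builds no intermediate lowered dict and never mutates defaults: for each role it scans the items back-to-front and stops at the first match (which is A's last-wins winner), then constructs the result dict directly.
import Mathlib
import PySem

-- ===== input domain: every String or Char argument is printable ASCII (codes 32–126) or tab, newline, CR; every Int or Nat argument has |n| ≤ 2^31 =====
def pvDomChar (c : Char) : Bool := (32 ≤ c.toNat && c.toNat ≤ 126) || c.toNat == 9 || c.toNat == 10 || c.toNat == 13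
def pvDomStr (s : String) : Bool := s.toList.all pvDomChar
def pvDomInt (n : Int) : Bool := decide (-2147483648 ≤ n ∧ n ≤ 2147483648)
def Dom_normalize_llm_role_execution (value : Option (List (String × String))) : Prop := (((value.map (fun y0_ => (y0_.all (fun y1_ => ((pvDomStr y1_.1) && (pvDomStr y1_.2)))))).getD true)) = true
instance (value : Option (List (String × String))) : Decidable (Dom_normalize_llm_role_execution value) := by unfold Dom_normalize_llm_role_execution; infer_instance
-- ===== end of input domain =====

-- B builds no intermediate lowered dict and never mutates defaults: per role it scans the
-- items back-to-front for the first match (A's last-wins winner) and builds the result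
-- directly (objective: alternative, same O(n) cost).


-- ===== PORT A =====
-- str(value or "").strip().lower() == "local" ? "local" : "remote"; the argument is always a
-- string here, and 'value or ""' is ported literally as the empty-string test.
def pvBackend (v : String) : String :=
  let text := PySem.Str.lower (PySem.Str.strip (if v = "" then "" else v))
  if text = "local" then "local" else "remote"

def normalize_llm_role_execution (value : Option (List (String × String))) : List (String × String) :=
  let normalized : PySem.Dict String String := PySem.Dict.ofList [("director", "remote")]
  match value with
  | none => normalized.items
  | some items =>
    let lowered : PySem.Dict String String :=
      items.foldl (fun d p => d.insert (PySem.Str.lower (PySem.Str.strip p.1)) p.2) PySem.Dict.empty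
    -- lowered.get(role) is guarded by 'role in lowered', so the some-case value is exact
    let normalized := ["director"].foldl (fun n role =>
      if lowered.contains role then n.insert role (pvBackend ((lowered.get? role).getD "")) else n) normalized
    normalized.items

-- ===== PORT B =====
def normalize_llm_role_execution_alt (value : Option (List (String × String))) : List (String × String) :=
  match value with
  | none => (PySem.Dict.ofList [("director", "remote")]).items
  | some items =>
    -- result built fresh: for the single role, take the first back-to-front match
    (["director"].foldl (fun result role =>
      let backend :=
        match items.reverse.find? (fun p => PySem.Str.lower (PySem.Str.strip p.1) == role) with
        | none => "remote"
        | some p => pvBackend p.2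
      result.insert role backend) (PySem.Dict.empty : PySem.Dict String String)).items

-- ===== PRECONDITION & SPEC =====
def Spec_normalize_llm_role_execution (value : Option (List (String × String))) (out : List (String × String)) : Prop := out = normalize_llm_role_execution_alt value
instance (value : Option (List (String × String))) (out : List (String × String)) : Decidable (Spec_normalize_llm_role_execution value out) := by unfold Spec_normalize_llm_role_execution; infer_instance

-- ===== CLAIM =====
def Claim_equal_normalize_llm_role_execution : Prop := ∀ (value : Option (List (String × String))), Dom_normalize_llm_role_execution value → Spec_normalize_llm_role_execution value (normalize_llm_role_execution value)

-- ===== LEMMAS AND PROOFS =====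

-- value of the last item whose normalized key is "director", as A's last-wins fold computes it
def pvLast (xs : List (String × String)) (a : Option String) : Option String :=
  xs.foldl (fun acc p => if PySem.Str.lower (PySem.Str.strip p.1) = "director" then some p.2 else acc) a

theorem pvLast_cons (p : String × String) (t : List (String × String)) (a : Option String) :
    pvLast (p :: t) a
      = pvLast t (if PySem.Str.lower (PySem.Str.strip p.1) = "director" then some p.2 else a) := by
  simp only [pvLast, List.foldl_cons]

theorem pvLast_start (xs : List (String × String)) (a : Option String) :
    pvLast xs a = match pvLast xs none with | none => a | some v => some v := by
  induction xs generalizing a with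
  | nil => rfl
  | cons p t ih =>
    rw [pvLast_cons, pvLast_cons]
    by_cases h : PySem.Str.lower (PySem.Str.strip p.1) = "director"
    · rw [if_pos h, if_pos h, ih (some p.2)]
      cases pvLast t none <;> rfl
    · rw [if_neg h, if_neg h]
      exact ih a

theorem pvA_get (xs : List (String × String)) (d : PySem.Dict String String) :
    (xs.foldl (fun d p => d.insert (PySem.Str.lower (PySem.Str.strip p.1)) p.2) d).get? "director"
      = pvLast xs (d.get? "director") := by
  induction xs generalizing d with
  | nil => rfl
  | cons p t ih =>
    rw [List.foldl_cons, pvLast_cons, ih]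
    by_cases h : PySem.Str.lower (PySem.Str.strip p.1) = "director"
    · rw [h, PySem.Dict.get?_insert_self, if_pos rfl]
    · rw [PySem.Dict.get?_insert_of_ne _ _ (fun hc => h hc.symm), if_neg h]

-- B's back-to-front first match is A's last-wins value
theorem pvFind_rev (xs : List (String × String)) :
    (xs.reverse.find? (fun p => PySem.Str.lower (PySem.Str.strip p.1) == "director")).map Prod.snd
      = pvLast xs none := by
  induction xs with
  | nil => rfl
  | cons p t ih =>
    rw [pvLast_cons, pvLast_start t, List.reverse_cons, List.find?_append, ← ih]
    cases hf : t.reverse.find? (fun p => PySem.Str.lower (PySem.Str.strip p.1) == "director") with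
    | none =>
      by_cases h : PySem.Str.lower (PySem.Str.strip p.1) = "director"
      · simp [h]
      · simp [h]
    | some q => simp

-- ===== VERDICT =====
theorem normalize_llm_role_execution_spec : Claim_equal_normalize_llm_role_execution := by
  unfold Claim_equal_normalize_llm_role_execution
  intro value _
  unfold Spec_normalize_llm_role_execution normalize_llm_role_execution normalize_llm_role_execution_alt
  cases value with
  | none => rfl
  | some xs =>
    simp only [List.foldl_cons, List.foldl_nil]
    rw [PySem.Dict.contains_eq_isSome_get?, pvA_get, PySem.Dict.get?_empty]
    cases h : pvLast xs none with
    | none =>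
      have hf : (xs.reverse.find? (fun p => PySem.Str.lower (PySem.Str.strip p.1) == "director")) = none := by
        have := pvFind_rev xs
        rw [h] at this
        exact Option.map_eq_none_iff.mp this
      simp only [hf]
      rfl
    | some v =>
      have hf := pvFind_rev xs
      rw [h] at hf
      cases hq : xs.reverse.find? (fun p => PySem.Str.lower (PySem.Str.strip p.1) == "director") with
      | none => rw [hq] at hf; simp at hf
      | some q =>
        rw [hq] at hf
        simp only [Option.map_some, Option.some.injEq] at hf
        simp only [hf]
        rfl
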